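-- pv_equiv track=rewrite | github.com/joker-beta/leetcode_record | dp/problems/Steps/SenseTime_20180907.py | Steps_nm
-- ===== SOURCE A (Python) =====
-- def Steps_nm(n, m):
--     if n == 1:
--         return 1
--     elif n == 2:
--         if m == 1:
--             return 1
--         else:
--             return 2
--     else:
--         dp = [1] + [i for i in range(1, n+1)]
--         for i in range(3, n+1):
--             # 下面完成dp[i] = dp[i-1] + ... + dp[i-m]
--             for j in range(i-1, i-m-1, -1):
--                 if j >= 0:
--                     dp[i] += dp[j]
--         return dp[n]
-- ===== SOURCE B (Python) =====
-- def Steps_nm(n, m):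
--     if n <= 0:
--         return 1
--     if n == 1:
--         return 1
--     if n == 2:
--         return 1 if m == 1 else 2
--     # pre[k] = dp[0] + ... + dp[k]; sliding window via prefix-sum difference, O(n)
--     pre = [1, 2, 4]
--     v = 2
--     for i in range(3, n + 1):
--         lo = min(i, max(0, i - m))
--         v = i + pre[-1] - (pre[lo - 1] if lo >= 1 else 0)
--         pre.append(pre[-1] + v)
--     return v
-- ===== Notes on version B (the rewrite author's own statement) =====
-- stated objective: faster
-- what changed: Replaces the O(n*m) nested loop (re-summing the last m dp values for every i) with a single O(n) pass that keeps a prefix-sum list and obtains each m-window sum as a difference of two prefix sums.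
import Mathlib
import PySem

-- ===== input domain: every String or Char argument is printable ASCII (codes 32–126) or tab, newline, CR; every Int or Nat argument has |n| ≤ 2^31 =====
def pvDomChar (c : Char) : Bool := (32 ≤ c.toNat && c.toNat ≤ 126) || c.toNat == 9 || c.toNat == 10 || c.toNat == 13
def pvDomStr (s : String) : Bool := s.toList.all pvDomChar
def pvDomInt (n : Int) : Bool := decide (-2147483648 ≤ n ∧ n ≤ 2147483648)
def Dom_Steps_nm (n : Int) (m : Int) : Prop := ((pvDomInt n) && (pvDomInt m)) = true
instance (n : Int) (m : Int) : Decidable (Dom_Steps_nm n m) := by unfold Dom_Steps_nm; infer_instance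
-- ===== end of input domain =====

-- B computes the same dp in one O(n) pass over a prefix-sum list instead of A's O(n*m) nested re-summation.

-- ===== PORT A =====
def Steps_nm (n : Int) (m : Int) : Int :=
  if n = 1 then 1
  else if n = 2 then (if m = 1 then 1 else 2)
  else
    let dp0 : List Int := 1 :: PySem.List.pyRange 1 (n+1) 1
    let dp := (PySem.List.pyRange 3 (n+1) 1).foldl (fun dp i =>
        (PySem.List.pyRange (i-1) (i-m-1) (-1)).foldl (fun dp j =>
          if 0 ≤ j then
            PySem.List.pySetD dp i (PySem.List.pyGetD dp i 0 + PySem.List.pyGetD dp j 0)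
          else dp) dp) dp0
    PySem.List.pyGetD dp n 0

-- ===== PORT B =====
def Steps_nm_alt (n : Int) (m : Int) : Int :=
  if n ≤ 0 then 1
  else if n = 1 then 1
  else if n = 2 then (if m = 1 then 1 else 2)
  else
    (((PySem.List.pyRange 3 (n+1) 1).foldl (fun (st : List Int × Int) i =>
        let lo := min i (max 0 (i - m))
        let v := i + PySem.List.pyGetD st.1 (-1) 0 -
                   (if 1 ≤ lo then PySem.List.pyGetD st.1 (lo-1) 0 else 0)
        (st.1 ++ [PySem.List.pyGetD st.1 (-1) 0 + v], v)) ([1, 2, 4], 2))).2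

-- ===== PRECONDITION & SPEC =====
-- Pre_ excludes exactly n ≤ -2, where the Python A raises IndexError (dp[n] on the one-element list [1]).
def Pre_Steps_nm (n : Int) (m : Int) : Prop := -1 ≤ n
instance (n : Int) (m : Int) : Decidable (Pre_Steps_nm n m) := by unfold Pre_Steps_nm; infer_instance
def pvWitness_Steps_nm : Int × Int := (5, 2)

def Spec_Steps_nm (n : Int) (m : Int) (out : Int) : Prop := out = Steps_nm_alt n m
instance (n : Int) (m : Int) (out : Int) : Decidable (Spec_Steps_nm n m out) := by unfold Spec_Steps_nm; infer_instance

-- ===== CLAIM (what is proved, stated in full; the proofs are below) =====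
def Claim_equal_Steps_nm : Prop := ∀ (n : Int) (m : Int), Dom_Steps_nm n m → Pre_Steps_nm n m → Spec_Steps_nm n m (Steps_nm n m)

-- ===== LEMMAS AND PROOFS =====

-- The mathematical sequence both programs compute:
-- F m 0 = 1, F m 1 = 1, F m 2 = 2, and F m i = i + (F m (max 0 (i-m)) + ... + F m (i-1)) for i >= 3.
def F (m : Int) : Nat → Int
  | 0 => 1
  | 1 => 1
  | 2 => 2
  | (i+3) =>
    ((i : Int)+3) + (((PySem.List.pyRange (max 0 ((i : Int)+3-m)) ((i : Int)+3) 1).attach.map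
        (fun j => F m j.1.toNat)).sum)
decreasing_by
  have h := PySem.List.mem_pyRange_one.mp j.2
  omega

-- the m-window sum F m (max 0 (i-m)) + ... + F m (i-1)
def W (m i : Int) : Int :=
  ((PySem.List.pyRange (max 0 (i-m)) i 1).map (fun j => F m j.toNat)).sum

-- prefix sums of F:  Psum m j = F m 0 + ... + F m j
def Psum (m : Int) (j : Nat) : Int := ((List.range (j+1)).map (F m)).sum

-- the prefix-sum list B maintains after processing i = 3 ... k
def preL (m : Int) (k : Nat) : List Int := (List.range (k+1)).map (Psum m)

-- the dp list A maintains after processing i = 3 ... k (entries above k still hold their initial value)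
def dpL (m : Int) (N k : Nat) : List Int :=
  (List.range (N+1)).map (fun j => if j ≤ k then F m j else (j:Int))

theorem F_succ (m : Int) (i : Nat) (h : 3 ≤ i) : F m i = (i : Int) + W m i := by
  obtain ⟨k, rfl⟩ : ∃ k, i = k + 3 := ⟨i - 3, by omega⟩
  rw [show ((k+3:Nat):Int) = (k:Int)+3 from by push_cast; ring, F, W]
  congr 1
  rw [List.attach_map_val (f := fun x : Int => F m x.toNat)]

theorem Psum_succ (m : Int) (k : Nat) : Psum m (k+1) = Psum m k + F m (k+1) := by
  simp [Psum, List.range_succ]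
  ring

theorem preL_succ (m : Int) (k : Nat) : preL m (k+1) = preL m k ++ [Psum m (k+1)] := by
  simp [preL, List.range_succ]

theorem preL_last (m : Int) (k : Nat) : PySem.List.pyGetD (preL m k) (-1) 0 = Psum m k := by
  cases k with
  | zero =>
    rw [show preL m 0 = [] ++ [Psum m 0] from by simp [preL]]
    exact PySem.List.pyGetD_neg_one_append_singleton _ _ _
  | succ k =>
    rw [preL_succ]
    exact PySem.List.pyGetD_neg_one_append_singleton _ _ _

theorem preL_get (m : Int) (k : Nat) (lo : Int) (h0 : 1 ≤ lo) (h1 : lo ≤ (k:Int)+1) :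
    PySem.List.pyGetD (preL m k) (lo-1) 0 = Psum m (lo.toNat - 1) := by
  rw [PySem.List.pyGetD_of_nonneg _ _ (by omega)]
  unfold preL
  rw [PySem.List.getD_map_range _ _ _ _ (by omega)]
  congr 1
  omega

-- block sum = difference of full range sums
theorem sum_range_block (m : Int) (lo i : Nat) (hlo : lo ≤ i) :
    ((List.range (i - lo)).map (fun k => F m (lo + k))).sum
      = ((List.range i).map (F m)).sum - ((List.range lo).map (F m)).sum := by
  obtain ⟨d, rfl⟩ : ∃ d, i = lo + d := ⟨i - lo, by omega⟩
  rw [show lo + d - lo = d from by omega, List.range_add, List.map_append, List.sum_append,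
      List.map_map]
  have he : (F m ∘ fun x => lo + x) = fun k => F m (lo + k) := rfl
  rw [he]
  ring

theorem sum_pyRange_F (m : Int) (lo i : Nat) (hlo : lo ≤ i) :
    ((PySem.List.pyRange (lo:Int) (i:Int) 1).map (fun j => F m j.toNat)).sum
      = ((List.range i).map (F m)).sum - ((List.range lo).map (F m)).sum := by
  rw [PySem.List.pyRange_one, List.map_map,
      show ((i:Int) - (lo:Int)).toNat = i - lo from by omega]
  rw [List.map_congr_left (g := fun k => F m (lo + k))
      (fun a _ => by
        show F m ((lo:Int) + (a:Int)).toNat = F m (lo + a)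
        rw [show ((lo:Int) + (a:Int)).toNat = lo + a from by omega])]
  exact sum_range_block m lo i hlo

theorem Psum_range (m : Int) (k : Nat) (hk : 1 ≤ k) :
    ((List.range k).map (F m)).sum = Psum m (k-1) := by
  unfold Psum
  rw [show k - 1 + 1 = k from by omega]

-- W as a difference of prefix sums, in terms of B's clamped lower bound
theorem W_eq_prefix (m i : Int) (hi : 3 ≤ i) :
    W m i = Psum m (i.toNat - 1) -
      (if 1 ≤ min i (max 0 (i - m)) then Psum m ((min i (max 0 (i-m))).toNat - 1) else 0) := by
  set lo : Int := min i (max 0 (i - m)) with hlo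
  have h0lo : 0 ≤ lo := by omega
  have hloi : lo ≤ i := by omega
  have hrange : PySem.List.pyRange (max 0 (i-m)) i 1 = PySem.List.pyRange lo i 1 := by
    by_cases h : max 0 (i-m) ≤ i
    · rw [show lo = max 0 (i-m) from by omega]
    · rw [PySem.List.pyRange_one_eq_nil (by omega), PySem.List.pyRange_one_eq_nil (by omega)]
  have hsum : ((PySem.List.pyRange lo i 1).map (fun j => F m j.toNat)).sum
      = Psum m (i.toNat - 1) - (if 1 ≤ lo then Psum m (lo.toNat - 1) else 0) := by
    have e1 : PySem.List.pyRange lo i 1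
        = PySem.List.pyRange ((lo.toNat : Nat) : Int) ((i.toNat : Nat) : Int) 1 := by
      rw [Int.toNat_of_nonneg h0lo, Int.toNat_of_nonneg (by omega)]
    rw [e1, sum_pyRange_F m lo.toNat i.toNat (by omega), Psum_range m i.toNat (by omega)]
    by_cases h1 : 1 ≤ lo
    · rw [if_pos h1, Psum_range m lo.toNat (by omega)]
    · rw [if_neg h1, show lo.toNat = 0 from by omega]
      simp
  rw [W, hrange, hsum]

-- reading / writing A's dp list
theorem dpL_len (m : Int) (N k : Nat) : ((dpL m N k).length : Int) = (N:Int)+1 := by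
  simp [dpL]

theorem dpL_get (m : Int) (N k : Nat) (j : Int) (h0 : 0 ≤ j) (hj : j ≤ (N:Int)) :
    PySem.List.pyGetD (dpL m N k) j 0
      = if j.toNat ≤ k then F m j.toNat else (j.toNat : Int) := by
  rw [PySem.List.pyGetD_of_nonneg _ _ h0]
  unfold dpL
  rw [PySem.List.getD_map_range _ _ _ _ (by omega)]

theorem getD_set_same (dp : List Int) (i v : Int) (h0 : 0 ≤ i) (h : i < (dp.length:Int)) :
    PySem.List.pyGetD (PySem.List.pySetD dp i v) i 0 = v := by
  rw [PySem.List.pySetD_of_nonneg _ _ h0, PySem.List.pyGetD_of_nonneg _ _ h0,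
      List.getD_eq_getElem _ _ (by rw [List.length_set]; omega), List.getElem_set_self]

theorem getD_set_other (dp : List Int) (i v j : Int) (h0i : 0 ≤ i) (h0 : 0 ≤ j) (hji : j < i)
    (hlen : i < (dp.length:Int)) :
    PySem.List.pyGetD (PySem.List.pySetD dp i v) j 0 = PySem.List.pyGetD dp j 0 := by
  rw [PySem.List.pySetD_of_nonneg _ _ h0i, PySem.List.pyGetD_of_nonneg _ _ h0,
      PySem.List.pyGetD_of_nonneg _ _ h0,
      List.getD_eq_getElem _ _ (by rw [List.length_set]; omega),
      List.getD_eq_getElem _ _ (by omega),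
      List.getElem_set_ne (by omega)]

theorem setD_setD (dp : List Int) (i a b : Int) (h0 : 0 ≤ i) :
    PySem.List.pySetD (PySem.List.pySetD dp i a) i b = PySem.List.pySetD dp i b := by
  rw [PySem.List.pySetD_of_nonneg _ _ h0, PySem.List.pySetD_of_nonneg _ _ h0,
      PySem.List.pySetD_of_nonneg _ _ h0, List.set_set]

theorem set_self_getD (dp : List Int) (i : Int) (h0 : 0 ≤ i) (h : i < (dp.length:Int)) :
    PySem.List.pySetD dp i (PySem.List.pyGetD dp i 0) = dp := by
  rw [PySem.List.pySetD_of_nonneg _ _ h0, PySem.List.pyGetD_of_nonneg _ _ h0,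
      List.getD_eq_getElem _ _ (by omega), List.set_getElem_self]

-- A's inner loop only writes index i and reads indices < i
theorem inner_fold (i : Int) (hi : 0 ≤ i) (L : List Int) (hL : ∀ j ∈ L, j < i) :
    ∀ dp : List Int, i < (dp.length : Int) →
    L.foldl (fun dp j =>
        if 0 ≤ j then
          PySem.List.pySetD dp i (PySem.List.pyGetD dp i 0 + PySem.List.pyGetD dp j 0)
        else dp) dp
      = PySem.List.pySetD dp i (PySem.List.pyGetD dp i 0
          + (L.map (fun j => if 0 ≤ j then PySem.List.pyGetD dp j 0 else 0)).sum) := by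
  induction L with
  | nil =>
    intro dp hlen
    simp only [List.foldl_nil, List.map_nil, List.sum_nil, add_zero]
    exact (set_self_getD dp i hi hlen).symm
  | cons j L ih =>
    intro dp hlen
    have hLtail : ∀ x ∈ L, x < i := fun x hx => hL x (List.mem_cons_of_mem _ hx)
    by_cases hj : 0 ≤ j
    · simp only [List.foldl_cons, if_pos hj, List.map_cons, List.sum_cons]
      rw [ih hLtail _ (by rw [PySem.List.length_pySetD]; omega)]
      rw [setD_setD _ _ _ _ hi,
          getD_set_same dp i _ hi hlen,
          List.map_congr_left (g := fun j => if 0 ≤ j then PySem.List.pyGetD dp j 0 else 0)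
            (fun x hx => by
              by_cases hx0 : 0 ≤ x
              · simp only [if_pos hx0]
                exact getD_set_other dp i _ x hi hx0 (hLtail x hx) hlen
              · simp only [if_neg hx0])]
      congr 1
      ring
    · simp only [List.foldl_cons, if_neg hj, List.map_cons, List.sum_cons]
      rw [ih hLtail dp hlen]
      congr 1
      ring

-- A's inner-loop sum is the window sum W
theorem A_window (m i : Int) (dp : List Int) (hi : 3 ≤ i)
    (hdp : ∀ j : Int, 0 ≤ j → j < i → PySem.List.pyGetD dp j 0 = F m j.toNat) :
    ((PySem.List.pyRange (i-1) (i-m-1) (-1)).map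
        (fun j => if 0 ≤ j then PySem.List.pyGetD dp j 0 else 0)).sum = W m i := by
  rw [PySem.List.pyRange_neg_one_eq_reverse,
      show i - m - 1 + 1 = i - m from by ring,
      show i - 1 + 1 = i from by ring,
      List.map_reverse, List.sum_reverse]
  by_cases h : i - m ≤ 0
  · rw [PySem.List.pyRange_one_append (i-m) 0 i h (by omega), List.map_append, List.sum_append]
    rw [List.sum_eq_zero (by
      intro x hx
      obtain ⟨j, hj, rfl⟩ := List.mem_map.mp hx
      rw [if_neg (by have := PySem.List.mem_pyRange_one.mp hj; omega)]), zero_add]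
    rw [W, max_eq_left h]
    rw [List.map_congr_left (g := fun j => F m j.toNat) (fun j hj => by
      have hm := PySem.List.mem_pyRange_one.mp hj
      rw [if_pos (by omega), hdp j (by omega) (by omega)])]
  · rw [W, max_eq_right (by omega : (0:Int) ≤ i - m)]
    rw [List.map_congr_left (g := fun j => F m j.toNat) (fun j hj => by
      have hm := PySem.List.mem_pyRange_one.mp hj
      rw [if_pos (by omega), hdp j (by omega) (by omega)])]

-- writing the new dp value turns snapshot k into snapshot k+1
theorem set_dpL (m : Int) (N k : Nat) (hk : k+1 ≤ N) :
    PySem.List.pySetD (dpL m N k) ((k:Int)+1) (F m (k+1)) = dpL m N (k+1) := by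
  rw [PySem.List.pySetD_of_nonneg _ _ (by omega),
      show ((k:Int)+1).toNat = k+1 from by omega]
  unfold dpL
  apply List.ext_getElem
  · simp
  · intro idx h1 h2
    simp only [List.length_map, List.length_range] at h1 h2
    by_cases h : idx = k+1
    · subst h
      rw [List.getElem_set_self, List.getElem_map, List.getElem_range, if_pos (by omega)]
    · rw [List.getElem_set_ne (by omega)]
      simp only [List.getElem_map, List.getElem_range]
      by_cases h3 : idx ≤ k
      · rw [if_pos h3, if_pos (by omega)]
      · rw [if_neg h3, if_neg (by omega)]

-- initial dp list of A
theorem dp0_eq (m : Int) (N : Nat) :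
    (1 :: PySem.List.pyRange 1 ((N:Int)+1) 1) = dpL m N 2 := by
  unfold dpL
  rw [PySem.List.pyRange_one, show ((N:Int)+1-1).toNat = N from by omega]
  apply List.ext_getElem
  · simp
  · intro idx h1 h2
    simp only [List.length_map, List.length_range] at h2
    cases idx with
    | zero => simp [F]
    | succ p =>
      simp only [List.getElem_cons_succ, List.getElem_map, List.getElem_range]
      by_cases hp0 : p = 0
      · subst hp0; norm_num [F]
      · by_cases hp1 : p = 1
        · subst hp1; norm_num [F]
        · rw [if_neg (by omega)]; push_cast; ring

-- A's outer loop invariant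
theorem A_loop (m : Int) (N : Nat) (hN : 3 ≤ N) (t : Nat) (ht : t + 2 ≤ N) :
    (PySem.List.pyRange 3 ((t:Int)+3) 1).foldl (fun dp i =>
        (PySem.List.pyRange (i-1) (i-m-1) (-1)).foldl (fun dp j =>
          if 0 ≤ j then
            PySem.List.pySetD dp i (PySem.List.pyGetD dp i 0 + PySem.List.pyGetD dp j 0)
          else dp) dp) (dpL m N 2)
      = dpL m N (t+2) := by
  induction t with
  | zero =>
    rw [show ((0:Nat):Int)+3 = 3 from by norm_num, PySem.List.pyRange_one_eq_nil le_rfl,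
        List.foldl_nil]
  | succ t ih =>
    have ih' := ih (by omega)
    rw [show (((t+1:Nat)):Int)+3 = ((t:Int)+3)+1 from by push_cast; ring,
        PySem.List.pyRange_one_succ_right (by omega), List.foldl_append, ih', List.foldl_cons,
        List.foldl_nil]
    have hget : ∀ j : Int, 0 ≤ j → j < (t:Int)+3 →
        PySem.List.pyGetD (dpL m N (t+2)) j 0 = F m j.toNat := by
      intro j hj0 hji
      rw [dpL_get m N (t+2) j hj0 (by push_cast; omega), if_pos (by omega)]
    rw [inner_fold ((t:Int)+3) (by omega)
          (PySem.List.pyRange ((t:Int)+3-1) ((t:Int)+3-m-1) (-1))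
          (fun j hj => by have := (PySem.List.mem_pyRange_neg_one).mp hj; omega)
          (dpL m N (t+2)) (by rw [dpL_len]; push_cast; omega)]
    rw [A_window m ((t:Int)+3) _ (by omega) hget]
    rw [dpL_get m N (t+2) ((t:Int)+3) (by omega) (by push_cast; omega),
        if_neg (by omega)]
    have hv : ((((t:Int)+3).toNat : Nat) : Int) + W m ((t:Int)+3) = F m (t+3) := by
      rw [F_succ m (t+3) (by omega), show ((t+3:Nat):Int) = (t:Int)+3 from by push_cast; ring,
          show ((((t:Int)+3).toNat : Nat) : Int) = (t:Int)+3 from by omega]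
    rw [hv, show t+1+2 = (t+2)+1 from by omega,
        show ((t:Int)+3) = ((t+2:Nat):Int)+1 from by push_cast; ring,
        show t+3 = (t+2)+1 from by omega]
    exact set_dpL m N (t+2) (by omega)

theorem A_eq_F (n m : Int) (h : 3 ≤ n) : Steps_nm n m = F m n.toNat := by
  obtain ⟨N, rfl⟩ : ∃ N : Nat, n = (N:Int) := ⟨n.toNat, by omega⟩
  have hN : 3 ≤ N := by omega
  simp only [Steps_nm]
  rw [if_neg (by omega), if_neg (by omega)]
  rw [dp0_eq m N]
  rw [show (N:Int)+1 = ((N-2:Nat):Int)+3 from by push_cast; omega]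
  rw [A_loop m N hN (N-2) (by omega), show N-2+2 = N from by omega]
  rw [dpL_get m N N ((N:Int)) (by omega) (by omega), if_pos (by omega)]

-- B's step value is the next F
theorem step_value (m : Int) (t : Nat) :
    ((t:Int)+3) + Psum m (t+2) -
      (if 1 ≤ min ((t:Int)+3) (max 0 (((t:Int)+3) - m)) then
          PySem.List.pyGetD (preL m (t+2)) ((min ((t:Int)+3) (max 0 (((t:Int)+3) - m)))-1) 0
        else 0)
      = F m (t+3) := by
  set i : Int := (t:Int)+3 with hi
  set lo : Int := min i (max 0 (i-m)) with hlo
  have hW := W_eq_prefix m i (by omega)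
  have hiN : i.toNat - 1 = t+2 := by omega
  have hcast : ((t+3:Nat):Int) = i := by rw [hi]; push_cast; ring
  by_cases h1 : 1 ≤ lo
  · rw [if_pos h1, preL_get m (t+2) lo h1 (by omega)]
    rw [F_succ m (t+3) (by omega), hcast, hW, if_pos h1, hiN]
    ring
  · rw [if_neg h1, F_succ m (t+3) (by omega), hcast, hW, if_neg h1, hiN]
    ring

-- B's loop invariant
theorem B_loop (m : Int) (t : Nat) :
    (PySem.List.pyRange 3 ((t:Int)+3) 1).foldl (fun (st : List Int × Int) i =>
        let lo := min i (max 0 (i - m))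
        let v := i + PySem.List.pyGetD st.1 (-1) 0 -
                   (if 1 ≤ lo then PySem.List.pyGetD st.1 (lo-1) 0 else 0)
        (st.1 ++ [PySem.List.pyGetD st.1 (-1) 0 + v], v)) ([1, 2, 4], 2)
      = (preL m (t+2), F m (t+2)) := by
  induction t with
  | zero =>
    rw [show ((0:Nat):Int)+3 = 3 from by norm_num, PySem.List.pyRange_one_eq_nil le_rfl,
        List.foldl_nil]
    have h0 : F m 0 = 1 := by rw [F]
    have h1 : F m 1 = 1 := by rw [F]
    have h2 : F m 2 = 2 := by rw [F]
    norm_num [preL, Psum, List.range_succ, h0, h1, h2]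
  | succ t ih =>
    rw [show (((t+1:Nat)):Int)+3 = ((t:Int)+3)+1 from by push_cast; ring,
        PySem.List.pyRange_one_succ_right (by omega), List.foldl_append, ih, List.foldl_cons,
        List.foldl_nil]
    dsimp only
    rw [preL_last m (t+2), step_value m t]
    rw [show t+1+2 = (t+2)+1 from by omega, preL_succ m (t+2), Psum_succ m (t+2),
        show (t+2)+1 = t+3 from by omega]

theorem B_eq_F (n m : Int) (h : 3 ≤ n) : Steps_nm_alt n m = F m n.toNat := by
  obtain ⟨N, rfl⟩ : ∃ N : Nat, n = (N:Int) := ⟨n.toNat, by omega⟩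
  have hN : 3 ≤ N := by omega
  simp only [Steps_nm_alt]
  rw [if_neg (by omega), if_neg (by omega), if_neg (by omega)]
  rw [show (N:Int)+1 = ((N-2:Nat):Int)+3 from by push_cast; omega]
  rw [B_loop m (N-2)]
  rw [show N-2+2 = N from by omega]
  simp

-- ===== VERDICT (by name: the statement is the Claim_ definition above) =====
theorem Steps_nm_spec : Claim_equal_Steps_nm := by
  intro n m _hd hp
  unfold Spec_Steps_nm
  by_cases h3 : 3 ≤ n
  · rw [A_eq_F n m h3, B_eq_F n m h3]
  · unfold Pre_Steps_nm at hp
    have h4 : n = -1 ∨ n = 0 ∨ n = 1 ∨ n = 2 := by omega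
    rcases h4 with rfl | rfl | rfl | rfl
    · simp [Steps_nm, Steps_nm_alt,
        show PySem.List.pyGetD [(1:Int)] (-1) 0 = 1 from by decide]
    · simp [Steps_nm, Steps_nm_alt,
        show PySem.List.pyGetD [(1:Int)] 0 0 = 1 from by decide]
    · simp [Steps_nm, Steps_nm_alt]
    · simp [Steps_nm, Steps_nm_alt]
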